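-- pv_equiv track=rewrite | github.com/gxurma/KiCadScripts | Coilgenerator.py | Kreis
-- ===== SOURCE A (Python) =====
-- def Kreis(p,xa,ya,xe,ye,a):
-- 	p.append((xa,ya))
-- 	p.append((xa,ye))
-- 	p.append((xe,ye))
-- 	p.append((xe,ya+a))
-- 	if ((xa + 2*a) < (xe - 2*a ) ) and ((ya + 2*a) < (ye - 2*a)) :
-- 		Kreis(p, xa+a,ya+a, xe-a,ye-a,a)
-- 	return p
-- ===== SOURCE B (Python) =====
-- def Kreis(p, xa, ya, xe, ye, a):
--     m = min(xe - xa, ye - ya)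
--     k = max(0, ((m - 1) // a - 4) // 2 + 1) if a > 0 else 0
--     for i in range(k + 1):
--         d = i * a
--         p.append((xa + d, ya + d))
--         p.append((xa + d, ye - d))
--         p.append((xe - d, ye - d))
--         p.append((xe - d, ya + d + a))
--     return p
-- ===== Notes on version B (the rewrite author's own statement) =====
-- stated objective: alternative
-- what changed: Replaces A's tail recursion (one call per nested rectangle) by computing the number of rings in closed form with integer division and emitting each ring's four corners from its index in a single flat loop.
import Mathlib
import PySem

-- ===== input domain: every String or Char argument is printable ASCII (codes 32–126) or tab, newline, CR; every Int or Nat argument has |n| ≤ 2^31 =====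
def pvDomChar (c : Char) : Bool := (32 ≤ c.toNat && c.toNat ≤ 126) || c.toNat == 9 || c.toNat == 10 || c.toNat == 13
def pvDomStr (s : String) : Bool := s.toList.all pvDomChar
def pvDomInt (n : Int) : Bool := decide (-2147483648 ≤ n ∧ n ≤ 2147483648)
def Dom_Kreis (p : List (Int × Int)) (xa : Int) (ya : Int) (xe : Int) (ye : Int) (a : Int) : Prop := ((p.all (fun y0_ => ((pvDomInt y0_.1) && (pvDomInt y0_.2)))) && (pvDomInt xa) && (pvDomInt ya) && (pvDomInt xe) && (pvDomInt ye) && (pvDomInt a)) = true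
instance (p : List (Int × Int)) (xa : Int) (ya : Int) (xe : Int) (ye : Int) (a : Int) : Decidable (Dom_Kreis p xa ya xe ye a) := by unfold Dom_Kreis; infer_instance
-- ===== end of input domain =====

-- B replaces A's tail recursion by computing the number of nested rectangles in closed form and
-- emitting each ring from its index (objective: alternative decomposition; both mutate p in Python,
-- the equivalence proved here is about the returned list).

-- ===== PORT A =====
-- Literal port of A's recursion; the extra '0 < a' conjunct is ONLY a totality guard: inside
-- Pre_Kreis the Python recursion happens only when 0 < a, so the guard never changes the result there.
def Kreis (p : List (Int × Int)) (xa : Int) (ya : Int) (xe : Int) (ye : Int) (a : Int) : List (Int × Int) :=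
  let p' := p ++ [(xa, ya), (xa, ye), (xe, ye), (xe, ya + a)]
  if h : xa + 2*a < xe - 2*a ∧ ya + 2*a < ye - 2*a ∧ 0 < a then
    Kreis p' (xa + a) (ya + a) (xe - a) (ye - a) a
  else p'
termination_by (xe - xa).toNat
decreasing_by omega

-- ===== PORT B =====
-- the four corner points of ring number i (offsets i*a from the outer rectangle), as in Source B's loop body
def pvRing (xa ya xe ye a i : Int) : List (Int × Int) :=
  [(xa + i*a, ya + i*a), (xa + i*a, ye - i*a), (xe - i*a, ye - i*a), (xe - i*a, ya + i*a + a)]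

def Kreis_alt (p : List (Int × Int)) (xa : Int) (ya : Int) (xe : Int) (ye : Int) (a : Int) : List (Int × Int) :=
  let m := min (xe - xa) (ye - ya)
  let k : Int := if 0 < a then max 0 (PySem.Int.floordiv (PySem.Int.floordiv (m - 1) a - 4) 2 + 1) else 0
  (PySem.List.pyRange 0 (k + 1) 1).foldl (fun acc i => acc ++ pvRing xa ya xe ye a i) p

-- ===== PRECONDITION & SPEC =====
-- Pre_ excludes only the inputs on which the Python A raises: a ≤ 0 while the shrink condition
-- holds, where the rectangles grow and the recursion never terminates (RecursionError).
def Pre_Kreis (p : List (Int × Int)) (xa : Int) (ya : Int) (xe : Int) (ye : Int) (a : Int) : Prop :=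
  0 < a ∨ ¬(xa + 2*a < xe - 2*a ∧ ya + 2*a < ye - 2*a)
instance (p : List (Int × Int)) (xa : Int) (ya : Int) (xe : Int) (ye : Int) (a : Int) : Decidable (Pre_Kreis p xa ya xe ye a) := by unfold Pre_Kreis; infer_instance

def pvWitness_Kreis : (List (Int × Int)) × Int × Int × Int × Int × Int := ([], 0, 0, 10, 10, 1)

def Spec_Kreis (p : List (Int × Int)) (xa : Int) (ya : Int) (xe : Int) (ye : Int) (a : Int) (out : List (Int × Int)) : Prop := out = Kreis_alt p xa ya xe ye a
instance (p : List (Int × Int)) (xa : Int) (ya : Int) (xe : Int) (ye : Int) (a : Int) (out : List (Int × Int)) : Decidable (Spec_Kreis p xa ya xe ye a out) := by unfold Spec_Kreis; infer_instance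

-- ===== CLAIM (what is proved, stated in full; the proofs are below) =====
def Claim_equal_Kreis : Prop := ∀ (p : List (Int × Int)) (xa : Int) (ya : Int) (xe : Int) (ye : Int) (a : Int), Dom_Kreis p xa ya xe ye a → Pre_Kreis p xa ya xe ye a → Spec_Kreis p xa ya xe ye a (Kreis p xa ya xe ye a)
-- ===== LEMMAS AND PROOFS =====

-- the list of the first n rings, written by structural recursion on the shrinking rectangle
def pvRings : Nat → Int → Int → Int → Int → Int → List (Int × Int)
  | 0, _, _, _, _, _ => []
  | n+1, xa, ya, xe, ye, a =>
      [(xa, ya), (xa, ye), (xe, ye), (xe, ya + a)] ++ pvRings n (xa + a) (ya + a) (xe - a) (ye - a) a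

-- number of EXTRA rings, as computed by Source B
def pvK (m a : Int) : Nat := (max 0 (PySem.Int.floordiv (PySem.Int.floordiv (m - 1) a - 4) 2 + 1)).toNat

lemma pvK_cast (m a : Int) :
    ((pvK m a : Nat) : Int) = max 0 (PySem.Int.floordiv (PySem.Int.floordiv (m - 1) a - 4) 2 + 1) :=
  Int.toNat_of_nonneg (le_max_left _ _)

lemma pvK_pos_iff (m a : Int) (ha : 0 < a) : 1 ≤ pvK m a ↔ 4 * a < m := by
  have ht := (PySem.Int.floordiv_eq_iff_of_pos (a := m - 1) (b := a)
      (q := PySem.Int.floordiv (m - 1) a) ha).mp rfl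
  unfold pvK
  rw [PySem.Int.floordiv_eq_ediv_of_pos (by omega : (0:Int) < 2)]
  constructor
  · intro h
    nlinarith [ht.1, ht.2, (by omega : 4 ≤ PySem.Int.floordiv (m - 1) a)]
  · intro h
    have h4 : 4 * a ≤ m - 1 := by omega
    have : 4 ≤ PySem.Int.floordiv (m - 1) a := by nlinarith [ht.1, ht.2]
    omega

lemma pvK_shift (m a : Int) (ha : 0 < a) (h4 : 4 * a < m) :
    pvK (m - 2 * a) a = pvK m a - 1 := by
  have ht := (PySem.Int.floordiv_eq_iff_of_pos (a := m - 1) (b := a)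
      (q := PySem.Int.floordiv (m - 1) a) ha).mp rfl
  have hshift : PySem.Int.floordiv (m - 2*a - 1) a = PySem.Int.floordiv (m - 1) a - 2 := by
    refine (PySem.Int.floordiv_eq_iff_of_pos (a := m - 2*a - 1) (b := a)
      (q := PySem.Int.floordiv (m - 1) a - 2) ha).mpr ⟨by nlinarith [ht.1, ht.2], by nlinarith [ht.1, ht.2]⟩
  have h4' : 4 ≤ PySem.Int.floordiv (m - 1) a := by nlinarith [ht.1, ht.2]
  unfold pvK
  rw [hshift, PySem.Int.floordiv_eq_ediv_of_pos (by omega : (0:Int) < 2),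
      PySem.Int.floordiv_eq_ediv_of_pos (by omega : (0:Int) < 2)]
  omega

lemma pvRing_zero (xa ya xe ye a : Int) :
    pvRing xa ya xe ye a 0 = [(xa, ya), (xa, ye), (xe, ye), (xe, ya + a)] := by
  simp [pvRing]

lemma pvRing_shift (xa ya xe ye a i : Int) :
    pvRing xa ya xe ye a (i + 1) = pvRing (xa + a) (ya + a) (xe - a) (ye - a) a i := by
  simp only [pvRing, List.cons.injEq, Prod.mk.injEq, and_true]
  refine ⟨⟨by ring, by ring⟩, ⟨by ring, by ring⟩, ⟨by ring, by ring⟩, by ring, by ring⟩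

-- A's recursion produces exactly pvK+1 rings
lemma kreis_eq_rings : ∀ (n : Nat) (p : List (Int × Int)) (xa ya xe ye a : Int), 0 < a →
    pvK (min (xe - xa) (ye - ya)) a = n →
    Kreis p xa ya xe ye a = p ++ pvRings (n + 1) xa ya xe ye a := by
  intro n
  induction n with
  | zero =>
    intro p xa ya xe ye a ha hk
    rw [Kreis]
    have hc : ¬(xa + 2*a < xe - 2*a ∧ ya + 2*a < ye - 2*a ∧ 0 < a) := by
      intro ⟨h1, h2, _⟩
      have : 4 * a < min (xe - xa) (ye - ya) := by omega
      have := (pvK_pos_iff _ a ha).mpr this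
      omega
    simp [hc, pvRings]
  | succ n ih =>
    intro p xa ya xe ye a ha hk
    rw [Kreis]
    have h4 : 4 * a < min (xe - xa) (ye - ya) := by
      by_contra h
      have := (pvK_pos_iff (min (xe - xa) (ye - ya)) a ha)
      omega
    have hc : xa + 2*a < xe - 2*a ∧ ya + 2*a < ye - 2*a ∧ 0 < a := by omega
    simp only [hc, and_self, dif_pos]
    have hmin : min (xe - a - (xa + a)) (ye - a - (ya + a)) = min (xe - xa) (ye - ya) - 2*a := by
      omega
    have hk' : pvK (min (xe - a - (xa + a)) (ye - a - (ya + a))) a = n := by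
      rw [hmin, pvK_shift _ a ha h4, hk]
      omega
    rw [ih _ _ _ _ _ _ ha hk']
    simp [pvRings, List.append_assoc]

-- B's indexed loop over n ring indices produces the same pvRings n
lemma alt_fold : ∀ (n : Nat) (p : List (Int × Int)) (xa ya xe ye a : Int),
    (PySem.List.pyRange 0 (n : Int) 1).foldl (fun acc i => acc ++ pvRing xa ya xe ye a i) p
      = p ++ pvRings n xa ya xe ye a := by
  intro n
  induction n with
  | zero =>
    intro p xa ya xe ye a
    rw [PySem.List.pyRange_one_eq_nil (by omega)]
    simp [pvRings]
  | succ n ih =>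
    intro p xa ya xe ye a
    rw [PySem.List.pyRange_one_cons (by omega : (0:Int) < (n+1 : Nat))]
    simp only [List.foldl_cons, zero_add]
    have hmap : PySem.List.pyRange 1 ((n+1 : Nat) : Int) 1
        = (PySem.List.pyRange 0 (n : Int) 1).map (· + 1) := by
      rw [PySem.List.pyRange_one, PySem.List.pyRange_one]
      have : ((n+1 : Nat) : Int) - 1 = (n : Int) - 0 := by omega
      rw [this]
      simp [Function.comp, add_comm]
    rw [hmap, List.foldl_map]
    have hfun : (fun (acc : List (Int × Int)) (i : Int) => acc ++ pvRing xa ya xe ye a (i + 1))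
        = (fun acc i => acc ++ pvRing (xa + a) (ya + a) (xe - a) (ye - a) a i) := by
      funext acc i
      rw [pvRing_shift]
    rw [hfun, ih]
    simp [pvRings, pvRing_zero, List.append_assoc]

lemma alt_eq_rings (p : List (Int × Int)) (xa ya xe ye a : Int) :
    Kreis_alt p xa ya xe ye a
      = p ++ pvRings ((if 0 < a then pvK (min (xe - xa) (ye - ya)) a else 0) + 1) xa ya xe ye a := by
  unfold Kreis_alt
  by_cases ha : 0 < a
  · simp only [ha, if_true]
    have : max 0 (PySem.Int.floordiv (PySem.Int.floordiv (min (xe - xa) (ye - ya) - 1) a - 4) 2 + 1) + 1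
        = (((pvK (min (xe - xa) (ye - ya)) a + 1 : Nat) : Nat) : Int) := by
      rw [← pvK_cast]; push_cast; ring
    rw [this, alt_fold]
  · simp only [ha, if_false]
    have : (0 : Int) + 1 = ((1 : Nat) : Int) := by norm_num
    rw [this, alt_fold]

-- ===== VERDICT (by name: the statement is the Claim_ definition above) =====
theorem Kreis_spec : Claim_equal_Kreis := by
  intro p xa ya xe ye a _ hpre
  unfold Spec_Kreis
  rcases hpre with ha | hnc
  · rw [alt_eq_rings, if_pos ha, kreis_eq_rings (pvK (min (xe - xa) (ye - ya)) a) p xa ya xe ye a ha rfl]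
  · rw [alt_eq_rings]
    have hk : (if 0 < a then pvK (min (xe - xa) (ye - ya)) a else 0) = 0 := by
      by_cases ha : 0 < a
      · simp only [ha, if_true]
        have := pvK_pos_iff (min (xe - xa) (ye - ya)) a ha
        by_contra h
        exact hnc (by omega)
      · simp [ha]
    rw [hk, Kreis]
    have hc : ¬(xa + 2*a < xe - 2*a ∧ ya + 2*a < ye - 2*a ∧ 0 < a) := by
      intro ⟨h1, h2, _⟩; exact hnc ⟨h1, h2⟩
    simp [hc, pvRings]
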